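-- pv_equiv track=rewrite | github.com/rmallorybpc/RFP-budget-analyzer | src/pdf_multi_agent_analysis/pipeline.py | _strip_reference_sections
-- ===== SOURCE A (Python) =====
-- def _strip_reference_sections(report: str) -> str:
--     marker_positions = [
--         idx
--         for idx in (
--             report.find("\n## Reference Assets"),
--             report.find("\n## Reference Document Status"),
--         )
--         if idx != -1
--     ]
--     if not marker_positions:
--         return report
--     return report[: min(marker_positions)].strip()
-- ===== SOURCE B (Python) =====
-- def _strip_reference_sections(report: str) -> str:
--     markers = ("\n## Reference Assets", "\n## Reference Document Status")
--     for i in range(len(report)):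
--         if report.startswith(markers, i):
--             return report[:i].strip()
--     return report
-- ===== Notes on version B (the rewrite author's own statement) =====
-- stated objective: idiomatic
-- what changed: Replaces two independent full-string find() scans plus a filtered min() with one left-to-right scan (str.startswith with a marker tuple) that stops at the earliest marker occurrence.
import Mathlib
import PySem

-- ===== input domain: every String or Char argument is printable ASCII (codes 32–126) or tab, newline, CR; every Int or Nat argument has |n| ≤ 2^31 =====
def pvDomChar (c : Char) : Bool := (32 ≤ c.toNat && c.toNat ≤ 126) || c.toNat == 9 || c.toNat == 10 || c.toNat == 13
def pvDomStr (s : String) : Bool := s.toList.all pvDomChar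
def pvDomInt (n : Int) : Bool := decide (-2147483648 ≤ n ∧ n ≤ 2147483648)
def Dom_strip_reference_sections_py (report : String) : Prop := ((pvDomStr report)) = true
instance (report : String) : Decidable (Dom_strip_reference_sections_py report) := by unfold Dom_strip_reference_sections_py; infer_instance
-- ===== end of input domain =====

-- B replaces A's two full find() scans + min() with one left-to-right scan stopping at the
-- earliest marker occurrence (idiomatic single pass; same asymptotic cost).

-- ===== PORT A =====
def strip_reference_sections_py (report : String) : String :=
  let marker_positions :=
    List.filter (fun idx => idx != -1)
      [PySem.Str.find report "\n## Reference Assets",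
       PySem.Str.find report "\n## Reference Document Status"]
  if marker_positions = [] then report
  else
    match PySem.List.min? marker_positions (fun idx => idx) with
    | some m => PySem.Str.strip (PySem.Str.slice report none (some m))
    | none => report

-- ===== PORT B =====
-- the 'for i in range(len(report)): if report.startswith(markers, i)' loop of Source B
def pvScanRefs (m1 m2 : List Char) : List Char → Nat → Option Nat
  | [], _ => none
  | c :: rest, i =>
    if PySem.Chars.startswith (c :: rest) m1 || PySem.Chars.startswith (c :: rest) m2 then
      some i
    else
      pvScanRefs m1 m2 rest (i + 1)

def strip_reference_sections_py_alt (report : String) : String :=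
  match pvScanRefs "\n## Reference Assets".toList "\n## Reference Document Status".toList
      report.toList 0 with
  | some i => PySem.Str.strip (PySem.Str.slice report none (some (i : Int)))
  | none => report

-- ===== PRECONDITION & SPEC =====
def Spec_strip_reference_sections_py (report : String) (out : String) : Prop := out = strip_reference_sections_py_alt report
instance (report : String) (out : String) : Decidable (Spec_strip_reference_sections_py report out) := by unfold Spec_strip_reference_sections_py; infer_instance

-- ===== CLAIM (what is proved, stated in full; the proofs are below) =====
def Claim_equal_strip_reference_sections_py : Prop := ∀ (report : String), Dom_strip_reference_sections_py report → Spec_strip_reference_sections_py report (strip_reference_sections_py report)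

-- ===== LEMMAS AND PROOFS =====

lemma pvFind_spec (cs sub : List Char) (h : PySem.Chars.find cs sub ≠ -1) :
    0 ≤ PySem.Chars.find cs sub ∧ sub <+: cs.drop (PySem.Chars.find cs sub).toNat ∧
      ∀ i, i < (PySem.Chars.find cs sub).toNat → ¬ sub <+: cs.drop i := by
  have hs := PySem.Chars.findFrom_natCast_spec cs sub 0 (Nat.zero_le _)
  rw [Nat.cast_zero, PySem.Chars.findFrom_zero] at hs
  have h' := hs h
  exact ⟨h'.1, h'.2.1, fun i hi => h'.2.2 i (Nat.zero_le _) hi⟩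

lemma pvFind_neg (cs sub : List Char) (h : PySem.Chars.find cs sub = -1) :
    ∀ j, ¬ sub <+: cs.drop j := by
  intro j hp
  have hin : PySem.Chars.isIn sub cs = true :=
    (PySem.Chars.exists_prefix_drop_iff_isIn sub cs).1 ⟨j, hp⟩
  rw [PySem.Chars.isIn_iff_infix] at hin
  exact (PySem.Chars.find_eq_neg_one_iff cs sub).1 h hin

lemma pvScan_none (m1 m2 : List Char) (h1 : m1 ≠ []) (h2 : m2 ≠ []) :
    ∀ (cs : List Char) (i : Nat), pvScanRefs m1 m2 cs i = none →
      ∀ j, ¬ m1 <+: cs.drop j ∧ ¬ m2 <+: cs.drop j := by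
  intro cs
  induction cs with
  | nil =>
    intro i _ j
    simp only [List.drop_nil]
    exact ⟨fun hp => h1 (List.prefix_nil.mp hp), fun hp => h2 (List.prefix_nil.mp hp)⟩
  | cons c rest ih =>
    intro i hscan j
    rw [pvScanRefs] at hscan
    split at hscan
    · exact absurd hscan (by simp)
    · rename_i hcond
      rw [Bool.or_eq_true, not_or] at hcond
      cases j with
      | zero =>
        simp only [List.drop_zero]
        exact ⟨fun hp => hcond.1 ((PySem.Chars.startswith_iff _ _).mpr hp),
               fun hp => hcond.2 ((PySem.Chars.startswith_iff _ _).mpr hp)⟩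
      | succ j' =>
        simpa using ih (i + 1) hscan j'

lemma pvScan_some (m1 m2 : List Char) :
    ∀ (cs : List Char) (i k : Nat), pvScanRefs m1 m2 cs i = some k →
      i ≤ k ∧ (m1 <+: cs.drop (k - i) ∨ m2 <+: cs.drop (k - i)) ∧
        ∀ l, l < k - i → ¬ m1 <+: cs.drop l ∧ ¬ m2 <+: cs.drop l := by
  intro cs
  induction cs with
  | nil => intro i k hscan; simp [pvScanRefs] at hscan
  | cons c rest ih =>
    intro i k hscan
    rw [pvScanRefs] at hscan
    split at hscan
    · rename_i hcond
      have hk : k = i := by simpa using hscan.symm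
      subst hk
      rw [Bool.or_eq_true] at hcond
      refine ⟨le_rfl, ?_, by omega⟩
      simpa [PySem.Chars.startswith_iff] using hcond
    · rename_i hcond
      rw [Bool.or_eq_true, not_or] at hcond
      obtain ⟨hik, hP, hmin⟩ := ih (i + 1) k hscan
      have hki : i ≤ k := by omega
      refine ⟨hki, ?_, ?_⟩
      · have : (c :: rest).drop (k - i) = rest.drop (k - (i + 1)) := by
          have : k - i = (k - (i + 1)) + 1 := by omega
          rw [this]; simp
        rw [this]; exact hP
      · intro l hl
        cases l with
        | zero =>
          simp only [List.drop_zero]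
          constructor
          · intro hp; exact hcond.1 ((PySem.Chars.startswith_iff _ _).mpr hp)
          · intro hp; exact hcond.2 ((PySem.Chars.startswith_iff _ _).mpr hp)
        | succ l' =>
          have := hmin l' (by omega)
          simpa using this

lemma pvM1_ne_nil : ("\n## Reference Assets" : String).toList ≠ [] := by decide
lemma pvM2_ne_nil : ("\n## Reference Document Status" : String).toList ≠ [] := by decide

theorem strip_reference_sections_py_spec : Claim_equal_strip_reference_sections_py := by
  unfold Claim_equal_strip_reference_sections_py
  intro report _
  unfold Spec_strip_reference_sections_py
  unfold strip_reference_sections_py strip_reference_sections_py_alt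
  rw [PySem.Str.find_eq, PySem.Str.find_eq]
  set cs := report.toList with hcs
  set m1 := ("\n## Reference Assets" : String).toList with hm1
  set m2 := ("\n## Reference Document Status" : String).toList with hm2
  set f1 := PySem.Chars.find cs m1 with hf1def
  set f2 := PySem.Chars.find cs m2 with hf2def
  by_cases hf1 : f1 = -1 <;> by_cases hf2 : f2 = -1
  · -- neither marker occurs
    cases hscan : pvScanRefs m1 m2 cs 0 with
    | none => simp [hf1, hf2]
    | some k =>
      obtain ⟨-, hP, -⟩ := pvScan_some m1 m2 cs 0 k hscan
      rcases hP with hp | hp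
      · exact absurd hp (pvFind_neg cs m1 hf1 _)
      · exact absurd hp (pvFind_neg cs m2 hf2 _)
  · -- only the second marker occurs
    cases hscan : pvScanRefs m1 m2 cs 0 with
    | none =>
      exact absurd (pvFind_spec cs m2 hf2).2.1
        ((pvScan_none m1 m2 pvM1_ne_nil pvM2_ne_nil cs 0 hscan _).2)
    | some k =>
      obtain ⟨-, hP, hmin⟩ := pvScan_some m1 m2 cs 0 k hscan
      simp only [Nat.sub_zero] at hP hmin
      obtain ⟨h0, hpre, hminf⟩ := pvFind_spec cs m2 hf2
      have hp2 : m2 <+: cs.drop k := by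
        rcases hP with hp | hp
        · exact absurd hp (pvFind_neg cs m1 hf1 _)
        · exact hp
      have h1 : ¬ k < f2.toNat := fun h => hminf k h hp2
      have h2 : ¬ f2.toNat < k := fun h => (hmin f2.toNat h).2 hpre
      have hk : f2 = (k : Int) := by omega
      simp [hf1, PySem.List.min?, hk]
  · -- only the first marker occurs
    cases hscan : pvScanRefs m1 m2 cs 0 with
    | none =>
      exact absurd (pvFind_spec cs m1 hf1).2.1
        ((pvScan_none m1 m2 pvM1_ne_nil pvM2_ne_nil cs 0 hscan _).1)
    | some k =>
      obtain ⟨-, hP, hmin⟩ := pvScan_some m1 m2 cs 0 k hscan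
      simp only [Nat.sub_zero] at hP hmin
      obtain ⟨h0, hpre, hminf⟩ := pvFind_spec cs m1 hf1
      have hp1 : m1 <+: cs.drop k := by
        rcases hP with hp | hp
        · exact hp
        · exact absurd hp (pvFind_neg cs m2 hf2 _)
      have h1 : ¬ k < f1.toNat := fun h => hminf k h hp1
      have h2 : ¬ f1.toNat < k := fun h => (hmin f1.toNat h).1 hpre
      have hk : f1 = (k : Int) := by omega
      simp [hf2, PySem.List.min?, hk]
  · -- both markers occur
    cases hscan : pvScanRefs m1 m2 cs 0 with
    | none =>
      exact absurd (pvFind_spec cs m1 hf1).2.1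
        ((pvScan_none m1 m2 pvM1_ne_nil pvM2_ne_nil cs 0 hscan _).1)
    | some k =>
      obtain ⟨-, hP, hmin⟩ := pvScan_some m1 m2 cs 0 k hscan
      simp only [Nat.sub_zero] at hP hmin
      obtain ⟨h01, hpre1, hminf1⟩ := pvFind_spec cs m1 hf1
      obtain ⟨h02, hpre2, hminf2⟩ := pvFind_spec cs m2 hf2
      have hge1 : ¬ f1.toNat < k := fun h => (hmin _ h).1 hpre1
      have hge2 : ¬ f2.toNat < k := fun h => (hmin _ h).2 hpre2
      have hle : f1.toNat ≤ k ∨ f2.toNat ≤ k := by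
        rcases hP with hp | hp
        · left; by_contra h; exact hminf1 k (by omega) hp
        · right; by_contra h; exact hminf2 k (by omega) hp
      have hk : (if f2 < f1 then some f2 else some (f1 : Int)) = some ((k : Int)) := by
        split_ifs with hlt <;> simp <;> omega
      simp [hf1, hf2, PySem.List.min?, hk]
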